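-- pv_equiv track=rewrite | github.com/BDmajora/tetris-ai-project | src/ai.py | get_bumpiness_penalty
-- ===== SOURCE A (Python) =====
-- def get_bumpiness_penalty(grid):
--     # Calculate a penalty based on the bumpiness of the grid
--     heights = []
--     for x in range(len(grid[0])):
--         for y in range(len(grid)):
--             if grid[y][x] != (0, 0, 0):
--                 heights.append(len(grid) - y)
--                 break
--         else:
--             heights.append(0)
--     bumpiness = sum(abs(heights[i] - heights[i + 1]) for i in range(len(heights) - 1))
--     return bumpiness
-- ===== SOURCE B (Python) =====
-- def get_bumpiness_penalty(grid):
--     # Row-major sweep: resolve all column heights in one top-down pass over the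
--     # rows, keeping only the still-unresolved columns, then sum adjacent diffs.
--     rows = len(grid)
--     width = len(grid[0])
--     heights = [0] * width
--     pending = list(range(width))
--     for y, row in enumerate(grid):
--         if not pending:
--             break
--         still = []
--         for x in pending:
--             if row[x] != (0, 0, 0):
--                 heights[x] = rows - y
--             else:
--                 still.append(x)
--         pending = still
--     return sum(abs(a - b) for a, b in zip(heights, heights[1:]))
-- ===== Notes on version B (the rewrite author's own statement) =====
-- stated objective: alternative
-- what changed: B replaces A's column-major per-column top-down scans with a single row-major sweep: it walks the rows once, maintaining the set of still-unresolved columns, records heights as columns get resolved, and stops early once every column is resolved; the bumpiness is then summed over zip(heights, heights[1:]) instead of an index range.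
import Mathlib
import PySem

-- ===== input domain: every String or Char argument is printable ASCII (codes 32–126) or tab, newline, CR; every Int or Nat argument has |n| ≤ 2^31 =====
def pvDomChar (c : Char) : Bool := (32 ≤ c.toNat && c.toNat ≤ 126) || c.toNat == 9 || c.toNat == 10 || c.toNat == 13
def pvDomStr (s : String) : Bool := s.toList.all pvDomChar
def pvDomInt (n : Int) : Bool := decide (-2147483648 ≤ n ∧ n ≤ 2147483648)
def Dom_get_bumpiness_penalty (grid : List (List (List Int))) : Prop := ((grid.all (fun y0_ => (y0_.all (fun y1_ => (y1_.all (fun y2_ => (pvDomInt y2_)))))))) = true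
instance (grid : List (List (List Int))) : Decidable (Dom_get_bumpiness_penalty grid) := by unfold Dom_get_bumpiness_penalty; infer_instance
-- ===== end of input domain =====

-- B replaces A's column-major per-column scans by a single row-major sweep that
-- tracks the still-unresolved columns — objective: alternative decomposition, same cost.

-- ===== PORT A =====
-- inner 'for y in range(len(grid))' with break/else: first filled row gives len(grid)-y, else 0
def pvScanA (grid : List (List (List Int))) (x : Int) : List Int → Int
  | [] => 0
  | y :: ys =>
    if PySem.List.pyGetD (PySem.List.pyGetD grid y []) x ([0, 0, 0] : List Int) ≠ [0, 0, 0] then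
      (grid.length : Int) - y
    else pvScanA grid x ys

def get_bumpiness_penalty (grid : List (List (List Int))) : Int :=
  let heights : List Int :=
    (PySem.List.pyRange 0 ((PySem.List.pyGetD grid 0 ([] : List (List Int))).length : Int) 1).foldl
      (fun hs x => hs ++ [pvScanA grid x (PySem.List.pyRange 0 (grid.length : Int) 1)]) []
  ((PySem.List.pyRange 0 ((heights.length : Int) - 1) 1).map
      (fun i => |PySem.List.pyGetD heights i 0 - PySem.List.pyGetD heights (i + 1) 0|)).sum

-- ===== PORT B =====
-- inner 'for x in pending: if row[x] != (0,0,0): heights[x] = rows - y else: still.append(x)'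
def pvRowB (row : List (List Int)) (v : Int) (st : List Int × List Int) (x : Int) : List Int × List Int :=
  if PySem.List.pyGetD row x ([0, 0, 0] : List Int) ≠ [0, 0, 0] then
    (PySem.List.pySetD st.1 x v, st.2)
  else (st.1, st.2 ++ [x])

-- 'for y, row in enumerate(grid): if not pending: break; …' — state = (heights, pending)
def pvLoopB (rows : Int) : List (List (List Int)) → Int → List Int × List Int → List Int × List Int
  | [], _, st => st
  | row :: rest, y, st =>
    if st.2 = [] then st
    else pvLoopB rows rest (y + 1) (st.2.foldl (pvRowB row (rows - y)) (st.1, []))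

def get_bumpiness_penalty_alt (grid : List (List (List Int))) : Int :=
  let rows : Int := grid.length
  let width : Nat := (PySem.List.pyGetD grid 0 ([] : List (List Int))).length
  let hs := (pvLoopB rows grid 0
      (List.replicate width (0 : Int), PySem.List.pyRange 0 (width : Int) 1)).1
  ((hs.zip hs.tail).map (fun p => |p.1 - p.2|)).sum

-- ===== PRECONDITION & SPEC =====
-- Pre_ excludes exactly the inputs where Python A raises IndexError: the empty grid
-- (grid[0]), and ragged grids where some column scan reaches a row shorter than row 0
-- (grid[y][x]) before finding a filled cell (B reads exactly the same cells and raises there too).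
def Pre_get_bumpiness_penalty (grid : List (List (List Int))) : Prop :=
  grid ≠ [] ∧
    ∀ x < (grid.headD []).length, ∀ y < grid.length,
      (grid.getD y []).length ≤ x →
        ∃ y' < y, (grid.getD y' []).getD x ([0, 0, 0] : List Int) ≠ [0, 0, 0]
instance (grid : List (List (List Int))) : Decidable (Pre_get_bumpiness_penalty grid) := by
  unfold Pre_get_bumpiness_penalty; infer_instance

def pvWitness_get_bumpiness_penalty : List (List (List Int)) :=
  [[[1, 2, 3], [0, 0, 0]], [[0, 0, 0], [0, 0, 0]]]

def Spec_get_bumpiness_penalty (grid : List (List (List Int))) (out : Int) : Prop := out = get_bumpiness_penalty_alt grid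
instance (grid : List (List (List Int))) (out : Int) : Decidable (Spec_get_bumpiness_penalty grid out) := by unfold Spec_get_bumpiness_penalty; infer_instance

-- ===== CLAIM (what is proved, stated in full; the proofs are below) =====
def Claim_equal_get_bumpiness_penalty : Prop := ∀ (grid : List (List (List Int))), Dom_get_bumpiness_penalty grid → Pre_get_bumpiness_penalty grid → Spec_get_bumpiness_penalty grid (get_bumpiness_penalty grid)

-- ===== LEMMAS AND PROOFS =====

-- structural first-filled-row scan with counter: common characterization of both programs
def pvColB (rows x : Int) : List (List (List Int)) → Int → Int
  | [], _ => 0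
  | row :: rest, y =>
    if PySem.List.pyGetD row x ([0, 0, 0] : List Int) ≠ [0, 0, 0] then rows - y
    else pvColB rows x rest (y + 1)

-- sum of absolute differences of adjacent elements (common value of both programs)
def pvAdj (hs : List Int) : Int := ((hs.zip hs.tail).map (fun p => |p.1 - p.2|)).sum

-- A's indexed scan over range(len(grid)) equals the structural scan with counter
theorem pv_col_eq (grid : List (List (List Int))) (x : Int) :
    ∀ (rest : List (List (List Int))) (k : Nat), rest = grid.drop k →
      pvScanA grid x (PySem.List.pyRange (k : Int) (grid.length : Int) 1)
        = pvColB (grid.length : Int) x rest (k : Int) := by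
  intro rest
  induction rest with
  | nil =>
    intro k hk
    have hlen : grid.length ≤ k := by
      have := List.drop_eq_nil_iff.mp hk.symm
      omega
    rw [PySem.List.pyRange_one_eq_nil (by exact_mod_cast hlen)]
    simp [pvScanA, pvColB]
  | cons row rest ih =>
    intro k hk
    have hklt : k < grid.length := by
      by_contra h
      have : grid.drop k = [] := List.drop_eq_nil_iff.mpr (by omega)
      rw [← hk] at this; simp at this
    have hrow : grid[k]? = some row := by
      have : (grid.drop k)[0]? = some row := by rw [← hk]; rfl
      simpa using this
    have hgrid : PySem.List.pyGetD grid (k : Int) [] = row := by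
      simp [PySem.List.pyGetD_natCast, List.getD, hrow]
    have hrest : rest = grid.drop (k + 1) := by
      have h2 : (List.drop k grid).tail = List.drop (k + 1) grid := by
        rw [← List.drop_drop]; simp
      rw [← h2, ← hk, List.tail_cons]
    have hcast : ((k : Int) + 1) = ((k + 1 : Nat) : Int) := by push_cast; ring
    rw [PySem.List.pyRange_one_cons (by exact_mod_cast hklt)]
    simp only [pvScanA, pvColB]
    rw [hgrid, hcast, ih (k + 1) hrest]

-- the index-based adjacent-difference sum equals the zip-based one (Nat range form)
theorem pv_adjNat : ∀ hs : List Int,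
    (List.range (hs.length - 1)).map (fun i => |hs.getD i 0 - hs.getD (i + 1) 0|)
      = (hs.zip hs.tail).map (fun p => |p.1 - p.2|)
  | [] => by simp
  | [a] => by simp
  | a :: b :: t => by
    have ih := pv_adjNat (b :: t)
    simp only [List.length_cons, Nat.add_sub_cancel, List.tail_cons] at ih ⊢
    rw [List.range_succ_eq_map]
    simp only [List.map_cons, List.map_map, List.zip_cons_cons]
    rw [← ih]
    congr 1

-- bridge to A's pyRange/pyGetD formulation
theorem pv_adjInt (hs : List Int) :
    ((PySem.List.pyRange 0 ((hs.length : Int) - 1) 1).map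
        (fun i => |PySem.List.pyGetD hs i 0 - PySem.List.pyGetD hs (i + 1) 0|)).sum = pvAdj hs := by
  cases hs with
  | nil => simp [PySem.List.pyRange_one_eq_nil, pvAdj]
  | cons a t =>
    have hlen : (((a :: t).length : Int) - 1) = ((t.length : Nat) : Int) := by
      simp
    rw [hlen, PySem.List.pyRange_zero_natCast]
    unfold pvAdj
    congr 1
    rw [← pv_adjNat (a :: t)]
    simp only [List.map_map, List.length_cons, Nat.add_sub_cancel]
    apply List.map_congr_left
    intro i _
    show |PySem.List.pyGetD (a :: t) (i : Int) 0 - PySem.List.pyGetD (a :: t) ((i : Int) + 1) 0|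
        = |(a :: t).getD i 0 - (a :: t).getD (i + 1) 0|
    have h1 : ((i : Int) + 1) = ((i + 1 : Nat) : Int) := by push_cast; ring
    rw [h1, PySem.List.pyGetD_natCast, PySem.List.pyGetD_natCast]

-- the write-only part of B's inner row loop
def pvWrite (row : List (List Int)) (v : Int) (hs : List Int) (pend : List Int) : List Int :=
  pend.foldl
    (fun h x => if PySem.List.pyGetD row x ([0, 0, 0] : List Int) ≠ [0, 0, 0] then PySem.List.pySetD h x v else h)
    hs

-- B's inner foldl splits into the writes and the filtered still-pending list
theorem pv_inner (row : List (List Int)) (v : Int) :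
    ∀ (pend : List Int) (hs acc : List Int),
      pend.foldl (pvRowB row v) (hs, acc)
        = (pvWrite row v hs pend,
           acc ++ pend.filter (fun x => decide (PySem.List.pyGetD row x ([0, 0, 0] : List Int) = [0, 0, 0]))) := by
  intro pend
  induction pend with
  | nil => intro hs acc; simp [pvWrite]
  | cons x p ih =>
    intro hs acc
    by_cases hx : PySem.List.pyGetD row x ([0, 0, 0] : List Int) ≠ [0, 0, 0]
    · simp only [List.foldl_cons, pvRowB, if_pos hx, pvWrite, List.filter_cons]
      rw [ih]
      simp [pvWrite, hx]
    · simp only [List.foldl_cons, pvRowB, if_neg hx, pvWrite, List.filter_cons]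
      rw [ih]
      rw [not_not] at hx
      simp [pvWrite, hx]

theorem pv_getD_set (xs : List Int) (n j : Nat) (v : Int) :
    (xs.set n v).getD j 0 = if n = j ∧ j < xs.length then v else xs.getD j 0 := by
  simp only [List.getD_eq_getElem?_getD, List.getElem?_set]
  split_ifs with h1 h2 h3 <;> simp_all

theorem pv_write_length (row : List (List Int)) (v : Int) :
    ∀ (pend : List Int) (hs : List Int), (pvWrite row v hs pend).length = hs.length := by
  intro pend
  induction pend with
  | nil => intro hs; simp [pvWrite]
  | cons x p ih =>
    intro hs
    have hstep : pvWrite row v hs (x :: p)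
        = pvWrite row v
            (if PySem.List.pyGetD row x ([0, 0, 0] : List Int) ≠ [0, 0, 0] then PySem.List.pySetD hs x v
             else hs) p := rfl
    rw [hstep, ih]
    split_ifs <;> simp [PySem.List.length_pySetD]

theorem pv_write_getD (row : List (List Int)) (v : Int) :
    ∀ (pend : List Int), (∀ x ∈ pend, (0 : Int) ≤ x) → ∀ (hs : List Int) (j : Nat),
      (pvWrite row v hs pend).getD j 0
        = if ((j : Int) ∈ pend ∧ PySem.List.pyGetD row (j : Int) ([0, 0, 0] : List Int) ≠ [0, 0, 0] ∧ j < hs.length) then v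
          else hs.getD j 0 := by
  intro pend
  induction pend with
  | nil => intro _ hs j; simp [pvWrite]
  | cons x p ih =>
    intro hpos hs j
    have hxpos : (0 : Int) ≤ x := hpos x (by simp)
    have hppos : ∀ y ∈ p, (0 : Int) ≤ y := fun y hy => hpos y (by simp [hy])
    have hstep : pvWrite row v hs (x :: p)
        = pvWrite row v
            (if PySem.List.pyGetD row x ([0, 0, 0] : List Int) ≠ [0, 0, 0] then PySem.List.pySetD hs x v
             else hs) p := rfl
    rw [hstep]
    by_cases hx : PySem.List.pyGetD row x ([0, 0, 0] : List Int) ≠ [0, 0, 0]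
    · rw [if_pos hx, ih hppos, PySem.List.pySetD_of_nonneg hs v hxpos, List.length_set,
        pv_getD_set]
      by_cases hxj : (j : Int) = x
      · subst hxj
        simp only [Int.toNat_natCast] at *
        have hfj : PySem.List.pyGetD row ((j : Nat) : Int) ([0, 0, 0] : List Int) ≠ [0, 0, 0] := hx
        simp only [List.mem_cons, true_or, hfj, true_and, ne_eq, not_false_eq_true]
        split_ifs with h1 h2 h3 <;> first | rfl | tauto
      · have hxj' : x.toNat ≠ j := fun h => hxj (by omega)
        rw [if_neg (show ¬(x.toNat = j ∧ j < hs.length) from fun h => hxj' h.1)]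
        simp only [List.mem_cons, hxj, false_or]
    · rw [if_neg hx, ih hppos]
      by_cases hxj : (j : Int) = x
      · rw [if_neg (fun h => hx (hxj ▸ h.2.1)), if_neg (fun h => hx (hxj ▸ h.2.1))]
      · simp only [List.mem_cons, hxj, false_or]

theorem pv_loop_length (rows : Int) :
    ∀ (rest : List (List (List Int))) (y : Int) (hs pend : List Int),
      ((pvLoopB rows rest y (hs, pend)).1).length = hs.length := by
  intro rest
  induction rest with
  | nil => intro y hs pend; rfl
  | cons row rest ih =>
    intro y hs pend
    by_cases hp : pend = []
    · simp [pvLoopB, hp]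
    · have hstep : pvLoopB rows (row :: rest) y (hs, pend)
          = pvLoopB rows rest (y + 1) (pend.foldl (pvRowB row (rows - y)) (hs, [])) := by
        simp [pvLoopB, hp]
      rw [hstep, pv_inner, ih, pv_write_length]

theorem pv_loop_char (rows : Int) :
    ∀ (rest : List (List (List Int))) (y : Int) (hs pend : List Int),
      (∀ x ∈ pend, (0 : Int) ≤ x) → (∀ x ∈ pend, hs.getD x.toNat 0 = 0) →
      ∀ j : Nat,
        ((pvLoopB rows rest y (hs, pend)).1).getD j 0
          = if ((j : Int) ∈ pend ∧ j < hs.length) then pvColB rows (j : Int) rest y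
            else hs.getD j 0 := by
  intro rest
  induction rest with
  | nil =>
    intro y hs pend _ hzero j
    simp only [pvLoopB, pvColB]
    by_cases hj : (j : Int) ∈ pend ∧ j < hs.length
    · rw [if_pos hj]
      have := hzero _ hj.1
      simpa using this
    · rw [if_neg hj]
  | cons row rest ih =>
    intro y hs pend hpos hzero j
    by_cases hp : pend = []
    · subst hp; simp [pvLoopB]
    · have hstep : pvLoopB rows (row :: rest) y (hs, pend)
          = pvLoopB rows rest (y + 1) (pend.foldl (pvRowB row (rows - y)) (hs, [])) := by
        simp [pvLoopB, hp]
      rw [hstep, pv_inner]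
      set still := pend.filter (fun x => decide (PySem.List.pyGetD row x ([0, 0, 0] : List Int) = [0, 0, 0])) with hstill
      set hs' := pvWrite row (rows - y) hs pend with hhs'
      have hspos : ∀ x ∈ still, (0 : Int) ≤ x := fun x hx => hpos x (List.mem_of_mem_filter hx)
      have hszero : ∀ x ∈ still, hs'.getD x.toNat 0 = 0 := by
        intro x hx
        have hxp : x ∈ pend := List.mem_of_mem_filter hx
        have hxe : PySem.List.pyGetD row x ([0, 0, 0] : List Int) = [0, 0, 0] := by
          have := List.of_mem_filter hx; simpa using this
        have hx0 : (0 : Int) ≤ x := hpos x hxp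
        rw [hhs', pv_write_getD row (rows - y) pend hpos hs x.toNat]
        rw [if_neg (by rw [show ((x.toNat : Nat) : Int) = x by omega]; tauto)]
        exact hzero x hxp
      rw [List.nil_append, ih (y + 1) hs' still hspos hszero j]
      have hlen' : hs'.length = hs.length := by rw [hhs', pv_write_length]
      have hwj := pv_write_getD row (rows - y) pend hpos hs j
      by_cases hjp : (j : Int) ∈ pend
      · by_cases hjl : j < hs.length
        · simp only [pvColB]
          by_cases hf : PySem.List.pyGetD row (j : Int) ([0, 0, 0] : List Int) ≠ [0, 0, 0]
          · have hjs : (j : Int) ∉ still := by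
              rw [hstill]; intro h
              have h2 := List.of_mem_filter h
              simp at h2 hf
              exact hf h2
            rw [if_neg (show ¬((j : Int) ∈ still ∧ j < hs'.length) from fun h => hjs h.1),
              hhs', hwj, if_pos ⟨hjp, hf, hjl⟩, if_pos ⟨hjp, hjl⟩, if_pos hf]
          · rw [not_not] at hf
            have hjs : (j : Int) ∈ still := by
              rw [hstill]; exact List.mem_filter.mpr ⟨hjp, by simp [hf]⟩
            rw [if_pos ⟨hjs, by omega⟩, if_pos ⟨hjp, hjl⟩, if_neg (by simp [hf])]
        · rw [if_neg (show ¬((j : Int) ∈ still ∧ j < hs'.length) from fun h => hjl (hlen' ▸ h.2)),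
            hhs', hwj, if_neg (fun h => hjl h.2.2), if_neg (fun h => hjl h.2)]
      · have hjs : (j : Int) ∉ still := fun h => hjp (List.mem_of_mem_filter h)
        rw [if_neg (by tauto), if_neg (by tauto), hhs', hwj, if_neg (by tauto)]

theorem pv_getD_replicate (w j : Nat) : (List.replicate w (0 : Int)).getD j 0 = 0 := by
  simp only [List.getD_eq_getElem?_getD, List.getElem?_replicate]
  split_ifs <;> simp

-- ===== VERDICT (by name: the statement is the Claim_ definition above) =====
theorem get_bumpiness_penalty_spec : Claim_equal_get_bumpiness_penalty := by
  intro grid _ _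
  unfold Spec_get_bumpiness_penalty get_bumpiness_penalty get_bumpiness_penalty_alt
  simp only [PySem.List.foldl_append_singleton_eq_map, List.nil_append]
  set w : Nat := (PySem.List.pyGetD grid 0 ([] : List (List Int))).length with hw
  set rows : Int := (grid.length : Int) with hrows
  set hsB : List Int := (pvLoopB rows grid 0
      (List.replicate w (0 : Int), PySem.List.pyRange 0 (w : Int) 1)).1 with hhsB
  set hsA : List Int := (PySem.List.pyRange 0 (w : Int) 1).map
      (fun x => pvScanA grid x (PySem.List.pyRange 0 rows 1)) with hhsA
  have hA_eq : hsA = (PySem.List.pyRange 0 (w : Int) 1).map (fun x => pvColB rows x grid 0) := by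
    rw [hhsA]
    apply List.map_congr_left
    intro x _
    have := pv_col_eq grid x grid 0 (by simp)
    simpa [hrows] using this
  have hlenA : hsA.length = w := by
    rw [hhsA]; simp [PySem.List.length_pyRange_one]
  have hlenB : hsB.length = w := by
    rw [hhsB, pv_loop_length]; simp
  have heq : hsB = hsA := by
    apply List.ext_getElem (by omega)
    intro j hj1 hj2
    have hjw : j < w := by omega
    have hB : hsB.getD j 0 = pvColB rows (j : Int) grid 0 := by
      rw [hhsB, pv_loop_char rows grid 0 _ _
        (fun x hx => ((PySem.List.mem_pyRange_one).mp hx).1)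
        (fun x _ => pv_getD_replicate w x.toNat) j]
      rw [if_pos ⟨(PySem.List.mem_pyRange_one).mpr ⟨by omega, by exact_mod_cast hjw⟩,
        by simpa using hjw⟩]
    have hA : hsA.getD j 0 = pvColB rows (j : Int) grid 0 := by
      rw [hA_eq]
      have := PySem.List.pyGetD_map_pyRange (fun x => pvColB rows x grid 0) w j 0 hjw
      rw [← PySem.List.pyGetD_natCast, this]
    rw [← List.getD_eq_getElem hsB 0 hj1, ← List.getD_eq_getElem hsA 0 hj2, hB, hA]
  rw [heq, pv_adjInt hsA]
  rfl
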